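-- pv_equiv track=rewrite | github.com/sunsikham/my_fv_project | scripts/score_cross_relation_unified_drift_control.py | _pattern_label
-- ===== SOURCE A (Python) =====
-- from typing import Dict, List, Optional, Sequence, Tuple
--
-- def _pattern_label(first_source: str, second_source: Optional[str], shot: int, mode: str) -> str:
--     if mode == "zero":
--         return "ZERO"
--     if mode == "prefix":
--         return first_source * shot
--     if mode == "alternating" and second_source is not None:
--         out: List[str] = []
--         for idx in range(shot):
--             out.append(first_source if idx % 2 == 0 else second_source)
--         return "".join(out)
--     raise ValueError(f"Unsupported pattern mode: {mode}")
-- ===== SOURCE B (Python) =====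
-- from typing import Optional
--
--
-- def _pattern_label(first_source: str, second_source: Optional[str], shot: int, mode: str) -> str:
--     if mode == "zero":
--         return "ZERO"
--     if mode == "prefix":
--         return first_source * shot
--     if mode == "alternating" and second_source is not None:
--         # consume the shot count two at a time: each full pair contributes
--         # first_source + second_source, and a leftover single contributes first_source
--         pieces = []
--         k = shot
--         while k >= 2:
--             pieces.append(first_source + second_source)
--             k -= 2
--         return "".join(pieces) + (first_source if k == 1 else "")
--     raise ValueError(f"Unsupported pattern mode: {mode}")
-- ===== Notes on version B (the rewrite author's own statement) =====
-- stated objective: alternative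
-- what changed: The alternating branch's per-index parity loop over range(shot) is replaced by a pairwise while-loop that consumes the count two at a time, appending first+second per full pair and handling the odd leftover once at the end.
import Mathlib
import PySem

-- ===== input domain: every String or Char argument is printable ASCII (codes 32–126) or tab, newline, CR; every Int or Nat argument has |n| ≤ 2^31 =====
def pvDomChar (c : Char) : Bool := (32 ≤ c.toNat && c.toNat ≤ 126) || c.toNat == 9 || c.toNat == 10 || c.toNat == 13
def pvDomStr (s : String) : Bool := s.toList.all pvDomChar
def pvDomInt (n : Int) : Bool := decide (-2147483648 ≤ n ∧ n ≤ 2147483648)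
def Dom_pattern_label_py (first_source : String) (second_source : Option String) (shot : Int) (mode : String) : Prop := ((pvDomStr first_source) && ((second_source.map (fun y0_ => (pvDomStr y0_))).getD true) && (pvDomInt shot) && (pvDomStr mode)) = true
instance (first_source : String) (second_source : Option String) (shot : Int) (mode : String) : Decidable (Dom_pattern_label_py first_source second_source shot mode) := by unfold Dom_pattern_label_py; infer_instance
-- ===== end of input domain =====

-- B replaces the per-index parity loop of the alternating branch by a pairwise while-loop
-- consuming the count two at a time; objective: alternative (same cost, different traversal).

-- Python's `s * n`: value is PySem.List.pyRepeat s n; the empty-string case is short-circuited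
-- (CPython returns '' for '' * n without iterating) so evaluation terminates quickly; same value.
def pyStrMul (xs : List Char) (n : Int) : List Char :=
  match xs with
  | [] => []
  | _ => PySem.List.pyRepeat xs n

-- ===== PORT A =====
-- A raises ValueError outside the three handled cases; that branch is excluded by Pre_ (port returns "" there).
def pattern_label_py (first_source : String) (second_source : Option String) (shot : Int) (mode : String) : String :=
  if mode == "zero" then "ZERO"
  else if mode == "prefix" then String.ofList (pyStrMul first_source.toList shot)
  else if mode == "alternating" && second_source.isSome then
    PySem.Str.join ""
      ((PySem.List.pyRange 0 shot 1).foldl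
        (fun acc idx => acc ++ [if PySem.Int.mod idx 2 == 0 then first_source else second_source.getD ""]) [])
  else ""

-- ===== PORT B =====
-- the Python `while k >= 2: pieces.append(first+second); k -= 2`, returning (pieces, final k)
def pvAltPairs (fs : String) (k : Int) (pieces : List String) : List String × Int :=
  if 2 ≤ k then pvAltPairs fs (k - 2) (pieces ++ [fs]) else (pieces, k)
termination_by k.toNat
decreasing_by omega

def pattern_label_py_alt (first_source : String) (second_source : Option String) (shot : Int) (mode : String) : String :=
  if mode == "zero" then "ZERO"
  else if mode == "prefix" then String.ofList (pyStrMul first_source.toList shot)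
  else if mode == "alternating" && second_source.isSome then
    let p := pvAltPairs (first_source ++ second_source.getD "") shot []
    PySem.Str.join "" p.1 ++ (if p.2 == 1 then first_source else "")
  else ""

-- ===== PRECONDITION & SPEC =====
-- Pre_ excludes exactly the inputs on which the Python A raises ValueError
-- (mode outside {"zero","prefix","alternating"}, or mode = "alternating" with second_source = None).
def Pre_pattern_label_py (first_source : String) (second_source : Option String) (shot : Int) (mode : String) : Prop :=
  mode = "zero" ∨ mode = "prefix" ∨ (mode = "alternating" ∧ second_source ≠ none)
instance (first_source : String) (second_source : Option String) (shot : Int) (mode : String) : Decidable (Pre_pattern_label_py first_source second_source shot mode) := by unfold Pre_pattern_label_py; infer_instance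

def pvWitness_pattern_label_py : String × Option String × Int × String := ("a", some "b", 3, "alternating")

def Spec_pattern_label_py (first_source : String) (second_source : Option String) (shot : Int) (mode : String) (out : String) : Prop := out = pattern_label_py_alt first_source second_source shot mode
instance (first_source : String) (second_source : Option String) (shot : Int) (mode : String) (out : String) : Decidable (Spec_pattern_label_py first_source second_source shot mode out) := by unfold Spec_pattern_label_py; infer_instance

-- ===== CLAIM =====
def Claim_equal_pattern_label_py : Prop := ∀ (first_source : String) (second_source : Option String) (shot : Int) (mode : String), Dom_pattern_label_py first_source second_source shot mode → Pre_pattern_label_py first_source second_source shot mode → Spec_pattern_label_py first_source second_source shot mode (pattern_label_py first_source second_source shot mode)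

-- ===== LEMMAS AND PROOFS =====

theorem chars_join_nil (l : List (List Char)) : PySem.Chars.join [] l = l.flatten := by
  induction l with
  | nil => rfl
  | cons h t ih =>
    cases t with
    | nil => simp [PySem.Chars.join, List.intercalate]
    | cons h2 t2 => simp_all [PySem.Chars.join, List.intercalate, List.intersperse]

-- the alternating per-index map, in closed form
theorem alt_core (a b : List Char) (n : Nat) :
    ((List.range n).map (fun i => if i % 2 = 0 then a else b)).flatten
      = (List.replicate (n / 2) (a ++ b)).flatten ++ (if n % 2 = 1 then a else []) := by
  induction n with
  | zero => simp
  | succ n ih =>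
    rw [List.range_succ, List.map_append, List.flatten_append, ih]
    rcases Nat.mod_two_eq_zero_or_one n with h | h
    · have h1 : (n + 1) / 2 = n / 2 := by omega
      have h2 : (n + 1) % 2 = 1 := by omega
      simp [h, h1, h2]
    · have h1 : (n + 1) / 2 = n / 2 + 1 := by omega
      have h2 : (n + 1) % 2 = 0 := by omega
      simp [h, h1, h2, List.replicate_succ', List.flatten_append, List.append_assoc]

theorem pyRange_zero_one (shot : Int) :
    PySem.List.pyRange 0 shot 1 = List.map (fun (k : Nat) => (k : Int)) (List.range shot.toNat) := by
  simp [PySem.List.pyRange]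
  rcases (by omega : shot ≤ 0 ∨ 0 < shot) with h | h
  · have h1 : ¬ ((0:Int) < shot) := by omega
    have h2 : shot.toNat = 0 := by omega
    simp [h1, h2]
  · simp [h]

-- the pairwise while-loop, in closed form (nonnegative count)
theorem pvAltPairs_spec (fs : String) (n : Nat) (pieces : List String) :
    pvAltPairs fs (n : Int) pieces = (pieces ++ List.replicate (n / 2) fs, ((n % 2 : Nat) : Int)) := by
  induction n using Nat.strong_induction_on generalizing pieces with
  | _ n ih =>
    rw [pvAltPairs]
    by_cases h : 2 ≤ (n : Int)
    · rw [if_pos h]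
      have h2 : 2 ≤ n := by omega
      have : ((n : Int) - 2) = ((n - 2 : Nat) : Int) := by omega
      rw [this, ih (n - 2) (by omega)]
      have hd : (n - 2) / 2 = n / 2 - 1 := by omega
      have hm : (n - 2) % 2 = n % 2 := by omega
      have hrep : List.replicate (n / 2) fs = fs :: List.replicate ((n - 2) / 2) fs := by
        have : n / 2 = (n - 2) / 2 + 1 := by omega
        rw [this, List.replicate_succ]
      simp [hm, hrep]
    · rw [if_neg h]
      have h0 : n = 0 ∨ n = 1 := by omega
      rcases h0 with h0 | h0 <;> simp [h0]

theorem pvAltPairs_neg (fs : String) (k : Int) (hk : k < 0) (pieces : List String) :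
    pvAltPairs fs k pieces = (pieces, k) := by
  rw [pvAltPairs, if_neg (by omega)]

theorem join_toList (l : List String) :
    (PySem.Str.join "" l).toList = (l.map String.toList).flatten := by
  simp [PySem.Str.join, chars_join_nil]

theorem pattern_label_py_spec : Claim_equal_pattern_label_py := by
  intro f s2 shot mode _hDom hPre
  unfold Spec_pattern_label_py pattern_label_py pattern_label_py_alt
  by_cases hz : (mode == "zero") = true
  · rw [if_pos hz, if_pos hz]
  rw [if_neg hz, if_neg hz]
  by_cases hp : (mode == "prefix") = true
  · rw [if_pos hp, if_pos hp]
  rw [if_neg hp, if_neg hp]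
  by_cases ha : (mode == "alternating" && s2.isSome) = true
  · rw [if_pos ha, if_pos ha]
    -- A's side: foldl-append is a map; join with empty sep is flatten
    rw [PySem.List.foldl_append_singleton_eq_map, List.nil_append]
    apply String.ext
    rcases (by omega : shot < 0 ∨ 0 ≤ shot) with hneg | hpos
    · -- empty range on both sides
      have h0 : shot.toNat = 0 := by omega
      rw [pvAltPairs_neg _ _ hneg]
      simp [pyRange_zero_one, h0, PySem.Str.join, PySem.Chars.join, List.intercalate,
        show (shot == 1) = false from by simp; omega]
    · have hsn : shot = ((shot.toNat : Nat) : Int) := by omega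
      rw [hsn, pvAltPairs_spec]
      -- A's list of strings as a map over Nat range
      have hlist : List.map String.toList
          (List.map (fun idx => if (PySem.Int.mod idx 2 == 0) = true then f else s2.getD "") (PySem.List.pyRange 0 ((shot.toNat : Nat) : Int) 1))
          = List.map (fun (k : Nat) => if k % 2 = 0 then f.toList else (s2.getD "").toList) (List.range shot.toNat) := by
        rw [pyRange_zero_one]
        simp only [Int.toNat_natCast, List.map_map]
        apply List.map_congr_left
        intro k _
        have hmod : PySem.Int.mod (k : Int) 2 = ((k % 2 : Nat) : Int) := by
          simp only [PySem.Int.mod, Int.fmod_eq_emod]; omega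
        simp only [Function.comp_apply]
        rw [hmod]
        rcases Nat.mod_two_eq_zero_or_one k with h | h <;> simp [h]
      simp only [List.nil_append, String.toList_append, join_toList, hlist,
        alt_core]
      congr 1
      · congr 1
        simp
      · rcases Nat.mod_two_eq_zero_or_one shot.toNat with h2 | h2 <;> simp [h2]
  · -- mode unhandled: excluded by Pre_ (Python raises ValueError); unreachable here
    exfalso
    rcases hPre with h | h | ⟨h1, h2⟩
    · simp [h] at hz
    · simp [h] at hp
    · rcases s2 with _ | s
      · exact h2 rfl
      · simp [h1] at ha
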